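-- pv_equiv track=rewrite | github.com/mukesh-Guntumadugu/llm_beatmap_generator | src/analysis/llm_beatmap_metrics.py | _count_streams
-- ===== SOURCE A (Python) =====
-- from typing import Dict, List, Optional, Tuple
--
-- def _count_streams(seq: List[Tuple[int, ...]], min_len: int = 4) -> int:
--     """Count non-overlapping runs of ≥min_len consecutive *single* active rows."""
--     count = run = 0
--     for tup in seq:
--         if sum(tup) == 1:   # exactly one arrow
--             run += 1
--         else:
--             if run >= min_len:
--                 count += 1
--             run = 0
--     if run >= min_len:
--         count += 1
--     return count
-- ===== SOURCE B (Python) =====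
-- from typing import Dict, List, Optional, Tuple
--
-- def _count_streams(seq: List[Tuple[int, ...]], min_len: int = 4) -> int:
--     """Count runs of >=min_len consecutive single-active rows via a mask split."""
--     mask = ''.join('1' if sum(t) == 1 else '0' for t in seq)
--     return sum(len(run) >= min_len for run in mask.split('0'))
-- ===== Notes on version B (the rewrite author's own statement) =====
-- stated objective: idiomatic
-- what changed: Replaces the explicit run/count accumulator loop with trailing flush by a two-stage pipeline: build a '1'/'0' activity mask string, split it on '0' into maximal runs, and count the pieces of length >= min_len.
import Mathlib
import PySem

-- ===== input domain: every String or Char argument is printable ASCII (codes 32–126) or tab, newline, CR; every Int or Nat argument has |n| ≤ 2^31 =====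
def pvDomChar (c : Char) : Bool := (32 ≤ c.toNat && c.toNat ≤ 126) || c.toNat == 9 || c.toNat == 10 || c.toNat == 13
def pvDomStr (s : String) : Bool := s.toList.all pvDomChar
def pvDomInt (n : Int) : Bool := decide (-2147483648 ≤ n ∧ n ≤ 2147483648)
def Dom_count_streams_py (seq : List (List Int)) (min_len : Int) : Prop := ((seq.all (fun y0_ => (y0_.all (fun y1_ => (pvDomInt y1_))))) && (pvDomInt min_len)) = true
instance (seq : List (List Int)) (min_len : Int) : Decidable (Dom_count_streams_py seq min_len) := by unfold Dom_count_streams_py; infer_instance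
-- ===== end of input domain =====

-- B replaces A's run/count accumulator loop by a mask-build / split-on-'0' / filter-count pipeline (idiomatic; same O(n) cost).

-- ===== PORT A =====
def count_streams_py (seq : List (List Int)) (min_len : Int) : Int :=
  let p := seq.foldl (fun (st : Int × Int) tup =>
      if tup.sum == 1 then (st.1, st.2 + 1)
      else (if st.2 ≥ min_len then (st.1 + 1, 0) else (st.1, 0))) ((0 : Int), (0 : Int))
  if p.2 ≥ min_len then p.1 + 1 else p.1

-- ===== PORT B =====
def count_streams_py_alt (seq : List (List Int)) (min_len : Int) : Int :=
  let mask := PySem.Str.join "" (seq.map (fun t => if t.sum == 1 then "1" else "0"))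
  -- Python str.split with a nonempty separator is exactly Chars.splitOn on the code points
  (PySem.Chars.splitOn mask.toList "0".toList).foldl
    (fun acc run => acc + (if ((run.length : Int)) ≥ min_len then 1 else 0)) 0

-- ===== PRECONDITION & SPEC =====
def Spec_count_streams_py (seq : List (List Int)) (min_len : Int) (out : Int) : Prop := out = count_streams_py_alt seq min_len
instance (seq : List (List Int)) (min_len : Int) (out : Int) : Decidable (Spec_count_streams_py seq min_len out) := by unfold Spec_count_streams_py; infer_instance

-- ===== CLAIM (what is proved, stated in full; the proofs are below) =====
def Claim_equal_count_streams_py : Prop := ∀ (seq : List (List Int)) (min_len : Int), Dom_count_streams_py seq min_len → Spec_count_streams_py seq min_len (count_streams_py seq min_len)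

-- ===== LEMMAS AND PROOFS =====

-- split-on-'0' spec: (first piece, remaining pieces)
def pvSp : List Char → List Char × List (List Char)
  | [] => ([], [])
  | c :: cs =>
    let r := pvSp cs
    if c = '0' then ([], r.1 :: r.2) else (c :: r.1, r.2)

theorem pvGo_spec (fuel : Nat) (l cur : List Char) (acc : List (List Char))
    (h : l.length ≤ fuel) :
    PySem.Chars.splitOn.go ['0'] fuel l cur acc
      = acc.reverse ++ (cur.reverse ++ (pvSp l).1) :: (pvSp l).2 := by
  induction fuel generalizing l cur acc with
  | zero =>
    have hl : l = [] := List.eq_nil_of_length_eq_zero (Nat.le_zero.mp h)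
    subst hl
    simp [PySem.Chars.splitOn.go, pvSp]
  | succ n ih =>
    match l with
    | [] => simp [PySem.Chars.splitOn.go, pvSp]
    | c :: rest =>
      by_cases hc : c = '0'
      · subst hc
        rw [show PySem.Chars.splitOn.go ['0'] (n+1) ('0' :: rest) cur acc
              = PySem.Chars.splitOn.go ['0'] n rest [] (cur.reverse :: acc) by
            simp [PySem.Chars.splitOn.go, List.isPrefixOf]]
        rw [ih rest [] (cur.reverse :: acc) (by simpa using Nat.lt_succ_iff.mp (by simpa using h))]
        simp [pvSp]
      · rw [show PySem.Chars.splitOn.go ['0'] (n+1) (c :: rest) cur acc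
              = PySem.Chars.splitOn.go ['0'] n rest (c :: cur) acc by
            simp [PySem.Chars.splitOn.go, List.isPrefixOf, Ne.symm hc]]
        rw [ih rest (c :: cur) acc (by simpa using Nat.lt_succ_iff.mp (by simpa using h))]
        simp [pvSp, hc]

theorem pvSplitOn_eq (cs : List Char) :
    PySem.Chars.splitOn cs ['0'] = (pvSp cs).1 :: (pvSp cs).2 := by
  unfold PySem.Chars.splitOn
  rw [pvGo_spec (cs.length + 1) cs [] [] (Nat.le_succ _)]
  simp

theorem pvFoldl_sum (min_len : Int) (l : List (List Char)) (a : Int) :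
    l.foldl (fun acc run => acc + (if ((run.length : Int)) ≥ min_len then 1 else 0)) a
      = a + (l.map (fun run => if ((run.length : Int)) ≥ min_len then (1 : Int) else 0)).sum := by
  induction l generalizing a with
  | nil => simp
  | cons x xs ih => simp [List.foldl_cons, ih, add_assoc]

-- A's loop invariant against the split spec
theorem pvLoop_spec (min_len : Int) (seq : List (List Int)) (c r : Int) :
    (if (seq.foldl (fun (st : Int × Int) tup =>
          if tup.sum == 1 then (st.1, st.2 + 1)
          else (if st.2 ≥ min_len then (st.1 + 1, 0) else (st.1, 0))) (c, r)).2 ≥ min_len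
      then (seq.foldl (fun (st : Int × Int) tup =>
          if tup.sum == 1 then (st.1, st.2 + 1)
          else (if st.2 ≥ min_len then (st.1 + 1, 0) else (st.1, 0))) (c, r)).1 + 1
      else (seq.foldl (fun (st : Int × Int) tup =>
          if tup.sum == 1 then (st.1, st.2 + 1)
          else (if st.2 ≥ min_len then (st.1 + 1, 0) else (st.1, 0))) (c, r)).1)
    = c + (if r + (((pvSp (seq.map (fun t => if t.sum = 1 then '1' else '0'))).1.length : Int)) ≥ min_len then 1 else 0)
        + (((pvSp (seq.map (fun t => if t.sum = 1 then '1' else '0'))).2.map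
            (fun run => if ((run.length : Int)) ≥ min_len then (1 : Int) else 0)).sum) := by
  induction seq generalizing c r with
  | nil =>
    simp only [List.foldl_nil, List.map_nil, pvSp, List.length_nil, List.map_nil, List.sum_nil]
    split_ifs with h1 h2 h2 <;> omega
  | cons t rest ih =>
    rw [List.foldl_cons]
    by_cases ht : t.sum = 1
    · rw [show (if (t.sum == 1) = true then ((c, r).1, (c, r).2 + 1)
            else if (c, r).2 ≥ min_len then ((c, r).1 + 1, 0) else ((c, r).1, 0)) = (c, r + 1)
          from by simp [ht]]
      rw [ih, List.map_cons, if_pos ht]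
      simp [pvSp]
      split_ifs <;> omega
    · rw [show (if (t.sum == 1) = true then ((c, r).1, (c, r).2 + 1)
            else if (c, r).2 ≥ min_len then ((c, r).1 + 1, 0) else ((c, r).1, 0))
            = (if r ≥ min_len then (c + 1, 0) else (c, 0))
          from by simp [ht]]
      rw [List.map_cons, if_neg ht]
      by_cases hr : r ≥ min_len
      · rw [if_pos hr, ih]
        simp [pvSp]
        split_ifs <;> omega
      · rw [if_neg hr, ih]
        simp [pvSp]
        split_ifs <;> omega

theorem pvMask_toList (seq : List (List Int)) :
    (PySem.Str.join "" (seq.map (fun t => if t.sum == 1 then "1" else "0"))).toList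
      = seq.map (fun t => if t.sum = 1 then '1' else '0') := by
  unfold PySem.Str.join
  rw [String.toList_ofList, List.map_map]
  have h : (String.toList ∘ fun t : List Int => if t.sum == 1 then "1" else "0")
      = (fun c => [c]) ∘ (fun t : List Int => if t.sum = 1 then '1' else '0') := by
    funext t; by_cases ht : t.sum = 1 <;> simp [ht]
  rw [h, ← List.map_map, show ("" : String).toList = [] from rfl,
    PySem.Chars.join_nil_singletons]

-- ===== VERDICT (by name: the statement is the Claim_ definition above) =====
theorem count_streams_py_spec : Claim_equal_count_streams_py := by
  intro seq min_len _
  unfold Spec_count_streams_py count_streams_py count_streams_py_alt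
  dsimp only
  rw [pvMask_toList, show ("0" : String).toList = ['0'] from rfl, pvSplitOn_eq,
    pvFoldl_sum, pvLoop_spec min_len seq 0 0]
  simp only [List.map_cons, List.sum_cons, zero_add]
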